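-- pv_equiv track=rewrite | github.com/zfifteen/archive | unified-framework/experiments/small_modulus_test.py | generate_small_semiprimes
-- ===== SOURCE A (Python) =====
-- import math
--
-- def is_prime(n):
--     if n < 2:
--         return False
--     for i in range(2, int(math.sqrt(n)) + 1):
--         if n % i == 0:
--             return False
--     return True
--
-- def generate_small_semiprimes(max_n=1000):
--     semiprimes = []
--     primes = [p for p in range(2, max_n) if is_prime(p)]
--     for i in range(len(primes)):
--         for j in range(i, len(primes)):
--             n = primes[i] * primes[j]
--             if n < max_n:
--                 semiprimes.append((n, primes[i], primes[j]))
--     return semiprimes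
-- ===== SOURCE B (Python) =====
-- def generate_small_semiprimes(max_n=1000):
--     # Different strategy: instead of enumerating prime pairs, scan each n < max_n
--     # once, factor it by trial division (p = smallest factor, q = cofactor); n is a
--     # semiprime iff p < n and q has no proper factor.  Collect (p, q, n) triples and
--     # sort by the factor pair to recover the (p, q)-major output order.
--     def smallest_factor(m):
--         d = 2
--         while d * d <= m:
--             if m % d == 0:
--                 return d
--             d += 1
--         return m
--
--     triples = []
--     for n in range(4, max_n):
--         p = smallest_factor(n)
--         if p < n:
--             q = n // p
--             if smallest_factor(q) == q:
--                 triples.append((p, q, n))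
--     triples.sort(key=lambda t: (t[0], t[1]))
--     return [(n, p, q) for p, q, n in triples]
-- ===== Notes on version B (the rewrite author's own statement) =====
-- stated objective: faster
-- what changed: Instead of building a prime list and enumerating all ordered prime pairs, B makes a single pass over every n < max_n, factors n by trial division (smallest factor p, cofactor q = n//p), keeps n iff q is prime, and then sorts the collected (p, q, n) triples by their factor pair to recover A's (p, q)-major output order; this removes A's Theta(pi(max_n)^2) pair scan.
import Mathlib
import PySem

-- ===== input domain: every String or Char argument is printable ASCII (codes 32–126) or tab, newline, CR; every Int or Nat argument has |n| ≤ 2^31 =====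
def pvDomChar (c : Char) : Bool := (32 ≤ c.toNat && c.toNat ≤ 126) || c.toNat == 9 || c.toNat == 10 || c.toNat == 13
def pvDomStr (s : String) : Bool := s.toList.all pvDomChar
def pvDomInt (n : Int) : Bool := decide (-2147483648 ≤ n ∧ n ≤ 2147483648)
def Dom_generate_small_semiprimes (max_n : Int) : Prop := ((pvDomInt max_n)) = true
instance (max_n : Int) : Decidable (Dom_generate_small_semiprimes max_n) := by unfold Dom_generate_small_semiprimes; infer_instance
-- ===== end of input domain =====

-- B replaces A's prime-pair enumeration by a single scan over all n < max_n that factors each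
-- n by trial division and keeps the semiprimes, then sorts the collected triples by their
-- factor pair to recover A's (p, q)-major output order.


-- ===== PORT A =====
-- int(math.sqrt(n)) is ported as Nat.sqrt: exact for every 0 ≤ n ≤ 2^31 (all n reached under Dom)
def is_prime (n : Int) : Bool :=
  if n < 2 then false
  else (PySem.List.pyRange 2 ((Nat.sqrt n.toNat : Int) + 1) 1).foldl
    (fun ok i => if PySem.Int.mod n i == 0 then false else ok) true

def generate_small_semiprimes (max_n : Int) : List (Int × Int × Int) :=
  let primes := (PySem.List.pyRange 2 max_n 1).filter is_prime
  (PySem.List.pyRange 0 (primes.length : Int) 1).foldl (fun acc i =>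
    (PySem.List.pyRange i (primes.length : Int) 1).foldl (fun acc2 j =>
      if PySem.List.pyGetD primes i 0 * PySem.List.pyGetD primes j 0 < max_n
      then acc2 ++ [(PySem.List.pyGetD primes i 0 * PySem.List.pyGetD primes j 0,
                     PySem.List.pyGetD primes i 0, PySem.List.pyGetD primes j 0)]
      else acc2) acc) []

-- ===== PORT B =====
-- the 'while d * d <= m' loop of Source B's smallest_factor; the fuel only makes the
-- loop total and never binds (the loop stops once d*d > m, and d starts at 2)
def sfAux : Nat → Int → Int → Int
  | 0, m, _ => m
  | fuel + 1, m, d =>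
    if d * d ≤ m then
      (if PySem.Int.mod m d == 0 then d else sfAux fuel m (d + 1))
    else m

def smallest_factor (m : Int) : Int := sfAux (m.toNat + 2) m 2

def generate_small_semiprimes_alt (max_n : Int) : List (Int × Int × Int) :=
  let triples := (PySem.List.pyRange 4 max_n 1).foldl (fun acc n =>
    let p := smallest_factor n
    if p < n then
      let q := PySem.Int.floordiv n p
      if smallest_factor q == q then acc ++ [(p, q, n)] else acc
    else acc) ([] : List (Int × Int × Int))
  (PySem.List.sorted2 triples (fun t => t.1) (fun t => t.2.1)).map (fun t => (t.2.2, t.1, t.2.1))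

-- ===== PRECONDITION & SPEC =====
def Spec_generate_small_semiprimes (max_n : Int) (out : List (Int × Int × Int)) : Prop := out = generate_small_semiprimes_alt max_n
instance (max_n : Int) (out : List (Int × Int × Int)) : Decidable (Spec_generate_small_semiprimes max_n out) := by unfold Spec_generate_small_semiprimes; infer_instance

-- ===== CLAIM (what is proved, stated in full; the proofs are below) =====
def Claim_equal_generate_small_semiprimes : Prop := ∀ (max_n : Int), Dom_generate_small_semiprimes max_n → Spec_generate_small_semiprimes max_n (generate_small_semiprimes max_n)

-- ===== LEMMAS AND PROOFS =====

-- the strict lexicographic order on the (p, q) components of a (p, q, n) triple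
def Lt3 (a b : Int × Int × Int) : Prop := a.1 < b.1 ∨ (a.1 = b.1 ∧ a.2.1 < b.2.1)

-- Source B's sort comparator (key = (t[0], t[1])), exactly as sorted2 unfolds it
def cmp3 (a b : Int × Int × Int) : Bool :=
  decide (a.1 < b.1) || (!decide (b.1 < a.1) && decide (a.2.1 < b.2.1))

-- the per-n semiprime test of Source B's scan, and the triple it records
def sfCondB (n : Int) : Bool :=
  decide (smallest_factor n < n) &&
    (smallest_factor (PySem.Int.floordiv n (smallest_factor n)) == PySem.Int.floordiv n (smallest_factor n))

def sfTriple (n : Int) : Int × Int × Int :=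
  (smallest_factor n, PySem.Int.floordiv n (smallest_factor n), n)

-- A's output, reorganised as a recursion over the suffixes of the prime list,
-- with each triple written in Source B's (p, q, n) component order
def blocksB (max_n : Int) : List Int → List (Int × Int × Int)
  | [] => []
  | p :: rest =>
      ((p :: rest).filter (fun q => decide (p * q < max_n))).map (fun q => (p, q, p * q))
        ++ blocksB max_n rest

theorem is_prime_iff (n : Int) : is_prime n = true ↔ 2 ≤ n ∧ Nat.Prime n.toNat := by
  unfold is_prime
  by_cases hn : n < 2
  · simp only [if_pos hn, Bool.false_eq_true, false_iff]
    rintro ⟨h, -⟩; omega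
  · rw [Int.not_lt] at hn
    have hcast : ((n.toNat : Int)) = n := by omega
    rw [if_neg (by omega), PySem.List.foldl_if_false_eq, Bool.true_and]
    have hiff : ((!(PySem.List.pyRange 2 ((Nat.sqrt n.toNat : Int) + 1) 1).any
        (fun i => PySem.Int.mod n i == 0)) = true) ↔
        ∀ i ∈ PySem.List.pyRange 2 ((Nat.sqrt n.toNat : Int) + 1) 1, ¬ (i ∣ n) := by
      simp [PySem.Int.mod_eq_zero_iff_dvd]
    rw [hiff, Nat.prime_def_le_sqrt]
    constructor
    · intro h
      refine ⟨hn, by omega, fun m hm2 hmsq hdvd => ?_⟩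
      have hmem : (m : Int) ∈ PySem.List.pyRange 2 ((Nat.sqrt n.toNat : Int) + 1) 1 := by
        rw [PySem.List.mem_pyRange_one]
        refine ⟨by exact_mod_cast hm2, by omega⟩
      exact h _ hmem (by rw [← hcast]; exact_mod_cast hdvd)
    · rintro ⟨-, h2, h⟩ i hi hidvd
      rw [PySem.List.mem_pyRange_one] at hi
      have h1 : (i.toNat : Int) ∣ (n.toNat : Int) := by
        rw [hcast, (by omega : (i.toNat : Int) = i)]; exact hidvd
      exact h i.toNat (by omega) (by omega) (by exact_mod_cast h1)

theorem sfAux_eq_minFac (m : Int) (hm : 2 ≤ m) : ∀ (fuel : Nat) (d : Int), 2 ≤ d →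
    d ≤ (Nat.minFac m.toNat : Int) → m < d + fuel →
    sfAux fuel m d = (Nat.minFac m.toNat : Int) := by
  intro fuel
  induction fuel with
  | zero =>
    intro d hd hle hfu
    have : Nat.minFac m.toNat ≤ m.toNat := Nat.le_of_dvd (by omega) (Nat.minFac_dvd _)
    omega
  | succ fuel ih =>
    intro d hd hle hfu
    simp only [sfAux]
    by_cases h1 : d * d ≤ m
    · rw [if_pos h1]
      by_cases h2 : (PySem.Int.mod m d == 0) = true
      · rw [if_pos h2]
        rw [beq_iff_eq, PySem.Int.mod_eq_zero_iff_dvd] at h2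
        have hdvd : d.toNat ∣ m.toNat := by
          have h3 : (d.toNat : Int) ∣ (m.toNat : Int) := by
            rw [(by omega : (d.toNat : Int) = d), (by omega : (m.toNat : Int) = m)]; exact h2
          exact_mod_cast h3
        have := Nat.minFac_le_of_dvd (by omega) hdvd
        omega
      · rw [if_neg h2]
        have hmf : (Nat.minFac m.toNat : Int) ∣ m := by
          have h3 : ((Nat.minFac m.toNat : Int)) ∣ (m.toNat : Int) :=
            Int.natCast_dvd_natCast.mpr (Nat.minFac_dvd m.toNat)
          rwa [(by omega : (m.toNat : Int) = m)] at h3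
        have hnd : ¬ d ∣ m := by
          simpa [PySem.Int.mod_eq_zero_iff_dvd] using h2
        apply ih (d + 1) (by omega) ?_ (by omega)
        rcases eq_or_lt_of_le hle with heq | hlt
        · exact absurd (heq ▸ hmf) hnd
        · omega
    · rw [if_neg h1]
      by_cases hp : Nat.Prime m.toNat
      · have : Nat.minFac m.toNat = m.toNat := (Nat.prime_def_minFac.mp hp).2
        rw [this]; omega
      · exfalso
        have hsq := Nat.minFac_sq_le_self (by omega : 0 < m.toNat) hp
        have h4 : ((Nat.minFac m.toNat ^ 2 : Nat) : Int) ≤ (m.toNat : Int) := by exact_mod_cast hsq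
        push_cast at h4
        have hc : (m.toNat : Int) = m := by omega
        rw [hc, pow_two] at h4
        nlinarith

theorem sf_eq_minFac (m : Int) (hm : 2 ≤ m) : smallest_factor m = (Nat.minFac m.toNat : Int) := by
  have h2 : 2 ≤ Nat.minFac m.toNat := (Nat.minFac_prime (by omega : m.toNat ≠ 1)).two_le
  exact sfAux_eq_minFac m hm (m.toNat + 2) 2 le_rfl (by omega) (by omega)

theorem sfCondB_iff (n : Int) : sfCondB n = true ↔
    smallest_factor n < n ∧
      smallest_factor (PySem.Int.floordiv n (smallest_factor n))
        = PySem.Int.floordiv n (smallest_factor n) := by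
  simp [sfCondB]

theorem sf_of_semiprime (P Q : Nat) (hp : Nat.Prime P) (hq : Nat.Prime Q) (hpq : P ≤ Q) :
    smallest_factor ((P : Int) * Q) = (P : Int) ∧
      PySem.Int.floordiv ((P : Int) * Q) (P : Int) = (Q : Int) ∧ sfCondB ((P : Int) * Q) = true := by
  have hp2 := hp.two_le
  have hq2 := hq.two_le
  have hPQ : ((P * Q : Nat) : Int) = (P : Int) * Q := by push_cast; ring
  have hn2 : 2 ≤ (P : Int) * Q := by
    have : (4 : Nat) ≤ P * Q := by nlinarith
    omega
  have htn : ((P : Int) * Q).toNat = P * Q := by omega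
  have hmf : Nat.minFac (P * Q) = P := by
    have h1 : Nat.minFac (P * Q) ≤ P := Nat.minFac_le_of_dvd hp2 ⟨Q, rfl⟩
    have hpr := Nat.minFac_prime (show P * Q ≠ 1 by nlinarith)
    rcases hpr.dvd_mul.mp (Nat.minFac_dvd _) with h | h
    · exact (Nat.prime_dvd_prime_iff_eq hpr hp).mp h
    · have := (Nat.prime_dvd_prime_iff_eq hpr hq).mp h; omega
  have hsf : smallest_factor ((P : Int) * Q) = (P : Int) := by
    rw [sf_eq_minFac _ hn2, htn, hmf]
  have hfd : PySem.Int.floordiv ((P : Int) * Q) (P : Int) = (Q : Int) := by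
    rw [PySem.Int.floordiv_eq_ediv_of_pos (by omega : (0 : Int) < P)]
    exact Int.mul_ediv_cancel_left _ (by omega)
  refine ⟨hsf, hfd, (sfCondB_iff _).mpr ⟨?_, ?_⟩⟩
  · rw [hsf]; nlinarith [hn2]
  · rw [hsf, hfd, sf_eq_minFac _ (by omega : 2 ≤ (Q : Int))]
    rw [(by omega : (Q : Int).toNat = Q), (Nat.prime_def_minFac.mp hq).2]

theorem sfCond_dest (n : Int) (hn : 2 ≤ n) (hc : sfCondB n = true) :
    ∃ P Q : Nat, Nat.Prime P ∧ Nat.Prime Q ∧ P ≤ Q ∧ n = (P : Int) * Q ∧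
      sfTriple n = ((P : Int), (Q : Int), n) := by
  obtain ⟨h1, h2⟩ := (sfCondB_iff n).mp hc
  have hsf := sf_eq_minFac n hn
  have hFpr : (Nat.minFac n.toNat).Prime := Nat.minFac_prime (by omega)
  have hF2 := hFpr.two_le
  obtain ⟨Q, hQ⟩ := Nat.minFac_dvd n.toNat
  set F := Nat.minFac n.toNat with hFdef
  have hnQ : n = (F : Int) * Q := by
    have h3 : (n.toNat : Int) = ((F * Q : Nat) : Int) := by exact_mod_cast congrArg (Nat.cast : Nat → Int) hQ
    push_cast at h3
    omega
  have hQ0 : Q ≠ 0 := by rintro rfl; rw [hnQ] at hn; simp at hn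
  have hQ1 : Q ≠ 1 := by
    rintro rfl
    rw [hsf] at h1
    have : n = (F : Int) := by rw [hnQ]; ring
    omega
  have hfd : PySem.Int.floordiv n (F : Int) = (Q : Int) := by
    rw [hnQ, PySem.Int.floordiv_eq_ediv_of_pos (by omega : (0 : Int) < F)]
    exact Int.mul_ediv_cancel_left _ (by omega)
  have hq2 : 2 ≤ Q := by omega
  have hQpr : Q.Prime := by
    rw [Nat.prime_def_minFac]
    refine ⟨hq2, ?_⟩
    rw [hsf, hfd, sf_eq_minFac _ (by omega : 2 ≤ (Q : Int)),
      (by omega : (Q : Int).toNat = Q)] at h2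
    exact_mod_cast h2
  have hFQ : F ≤ Q := by
    have hdvd : Q ∣ n.toNat := ⟨F, by rw [hQ, Nat.mul_comm]⟩
    have := Nat.minFac_le_of_dvd hq2 hdvd
    omega
  exact ⟨F, Q, hFpr, hQpr, hFQ, hnQ, by simp [sfTriple, hsf, hfd]⟩

theorem mem_blocksB (max_n : Int) (P : List Int) (hs : P.Pairwise (· < ·)) (t : Int × Int × Int) :
    t ∈ blocksB max_n P ↔
      ∃ p q, p ∈ P ∧ q ∈ P ∧ p ≤ q ∧ p * q < max_n ∧ t = (p, q, p * q) := by
  induction hs with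
  | nil => simp [blocksB]
  | @cons p rest hx hl ih =>
    rw [blocksB, List.mem_append, List.mem_map, ih]
    constructor
    · rintro (⟨q, hq, rfl⟩ | ⟨a, b, ha, hb, hab, hlt, rfl⟩)
      · rw [List.mem_filter, decide_eq_true_eq] at hq
        refine ⟨p, q, List.mem_cons_self .., hq.1, ?_, hq.2, rfl⟩
        rcases List.mem_cons.mp hq.1 with rfl | h
        · exact le_rfl
        · exact le_of_lt (hx _ h)
      · exact ⟨a, b, List.mem_cons_of_mem _ ha, List.mem_cons_of_mem _ hb, hab, hlt, rfl⟩
    · rintro ⟨a, b, ha, hb, hab, hlt, rfl⟩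
      rcases List.mem_cons.mp ha with rfl | ha'
      · exact Or.inl ⟨b, List.mem_filter.mpr ⟨hb, by simpa using hlt⟩, rfl⟩
      · refine Or.inr ⟨a, b, ha', ?_, hab, hlt, rfl⟩
        rcases List.mem_cons.mp hb with rfl | h
        · exfalso; have := hx a ha'; omega
        · exact h

theorem pairwise_blocksB (max_n : Int) (P : List Int) (hs : P.Pairwise (· < ·)) :
    (blocksB max_n P).Pairwise Lt3 := by
  induction hs with
  | nil => simp [blocksB]
  | @cons p rest hx hl ih =>
    rw [blocksB, List.pairwise_append]
    refine ⟨?_, ih, ?_⟩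
    · rw [List.pairwise_map]
      apply List.Pairwise.filter
      exact (List.Pairwise.cons hx hl).imp (fun h => Or.inr ⟨rfl, h⟩)
    · intro a ha b hb
      rw [List.mem_map] at ha
      obtain ⟨q, -, rfl⟩ := ha
      rw [mem_blocksB _ _ hl] at hb
      obtain ⟨p', q', hp', -, -, -, rfl⟩ := hb
      exact Or.inl (by simpa using hx p' hp')

theorem cmp3_eq_true_iff (a b : Int × Int × Int) : cmp3 a b = true ↔ Lt3 a b := by
  simp only [cmp3, Lt3, Bool.or_eq_true, Bool.and_eq_true, Bool.not_eq_eq_eq_not,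
    Bool.not_true, decide_eq_true_eq, decide_eq_false_iff_not]
  omega

theorem insertBy_pairwise (x : Int × Int × Int) (ys : List (Int × Int × Int))
    (h : ys.Pairwise (fun a b => ¬ Lt3 b a)) :
    (PySem.List.insertBy cmp3 x ys).Pairwise (fun a b => ¬ Lt3 b a) := by
  induction ys with
  | nil => simp [PySem.List.insertBy]
  | cons y ys ih =>
    rw [List.pairwise_cons] at h
    rw [show PySem.List.insertBy cmp3 x (y :: ys)
        = if cmp3 x y then x :: y :: ys else y :: PySem.List.insertBy cmp3 x ys from rfl]
    by_cases hc : cmp3 x y = true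
    · rw [if_pos hc]
      have hxy : Lt3 x y := (cmp3_eq_true_iff x y).mp hc
      refine List.Pairwise.cons ?_ (List.Pairwise.cons h.1 h.2)
      intro z hz
      rcases List.mem_cons.mp hz with rfl | hz'
      · unfold Lt3 at *; omega
      · have := h.1 z hz'; unfold Lt3 at *; omega
    · rw [if_neg hc]
      have hxy : ¬ Lt3 x y := fun hl => hc ((cmp3_eq_true_iff x y).mpr hl)
      refine List.Pairwise.cons ?_ (ih h.2)
      intro z hz
      rcases (PySem.List.mem_insertBy _ _ _ _).mp hz with rfl | hz'
      · exact hxy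
      · exact h.1 z hz'

theorem foldl_insertBy_pairwise (xs : List (Int × Int × Int)) :
    ∀ acc, acc.Pairwise (fun a b => ¬ Lt3 b a) →
      (xs.foldl (fun acc x => PySem.List.insertBy cmp3 x acc) acc).Pairwise
        (fun a b => ¬ Lt3 b a) := by
  induction xs with
  | nil => intro acc h; exact h
  | cons x xs ih => intro acc h; exact ih _ (insertBy_pairwise x acc h)

theorem sorted2_eq_of_perm_of_pairwise (xs ys : List (Int × Int × Int))
    (hp : ys.Perm xs) (hs : ys.Pairwise Lt3) :
    PySem.List.sorted2 xs (fun t => t.1) (fun t => t.2.1) false = ys := by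
  have hdef : PySem.List.sorted2 xs (fun t => t.1) (fun t => t.2.1) false
      = xs.foldl (fun acc x => PySem.List.insertBy cmp3 x acc) [] := rfl
  have hsp : (PySem.List.sorted2 xs (fun t => t.1) (fun t => t.2.1) false).Perm xs :=
    PySem.List.sorted2_perm xs _ _ false
  have hperm : (PySem.List.sorted2 xs (fun t => t.1) (fun t => t.2.1) false).Perm ys :=
    hsp.trans hp.symm
  have hle : (PySem.List.sorted2 xs (fun t => t.1) (fun t => t.2.1) false).Pairwise
      (fun a b => ¬ Lt3 b a) := by
    rw [hdef]; exact foldl_insertBy_pairwise xs [] (by simp)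
  have hkey : ((PySem.List.sorted2 xs (fun t => t.1) (fun t => t.2.1) false).map
      (fun t => (t.1, t.2.1))).Nodup := by
    refine (hperm.symm.map _).nodup ?_
    have : (ys.map (fun t => (t.1, t.2.1))).Pairwise (· ≠ ·) :=
      List.pairwise_map.mpr (hs.imp (fun h heq => by
        rw [Prod.mk.injEq] at heq
        unfold Lt3 at h
        omega))
    exact this
  have hnd : (PySem.List.sorted2 xs (fun t => t.1) (fun t => t.2.1) false).Pairwise
      (fun a b => (a.1, a.2.1) ≠ (b.1, b.2.1)) := List.pairwise_map.mp hkey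
  have hstrict : (PySem.List.sorted2 xs (fun t => t.1) (fun t => t.2.1) false).Pairwise Lt3 := by
    refine (hle.and hnd).imp ?_
    rintro a b ⟨h1, h2⟩
    unfold Lt3 at *
    rw [ne_eq, Prod.mk.injEq] at h2
    omega
  refine List.Perm.eq_of_pairwise ?_ hstrict hs hperm
  intro a b _ _ h1 h2
  exfalso; unfold Lt3 at *; omega

theorem map_pyGetD_drop (P : List Int) (i : Nat) :
    (PySem.List.pyRange (i : Int) (P.length : Int) 1).map (fun j => PySem.List.pyGetD P j 0)
      = P.drop i := by
  apply List.ext_getElem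
  · simp [PySem.List.length_pyRange_one]
  · intro k hk1 hk2
    simp only [List.getElem_map, PySem.List.getElem_pyRange_one, List.getElem_drop]
    rw [(by push_cast; ring : (i : Int) + (k : Int) = ((i + k : Nat) : Int)),
      PySem.List.pyGetD_natCast]
    rw [List.length_drop] at hk2
    rw [List.getD_eq_getElem _ _ (by omega)]

theorem flatMap_range_drop (max_n : Int) (P : List Int) :
    (List.range P.length).flatMap (fun k =>
      ((P.drop k).filter (fun q => decide (P.getD k 0 * q < max_n))).map
        (fun q => (P.getD k 0 * q, P.getD k 0, q)))
    = (blocksB max_n P).map (fun t => (t.2.2, t.1, t.2.1)) := by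
  induction P with
  | nil => simp [blocksB]
  | cons p rest ih =>
    rw [List.length_cons, List.range_succ_eq_map, List.flatMap_cons, List.flatMap_map,
      blocksB, List.map_append]
    congr 1
    simp only [List.drop_zero, List.getD_cons_zero, List.map_map]
    rfl

theorem A_eq_blocks (max_n : Int) :
    generate_small_semiprimes max_n
      = (blocksB max_n ((PySem.List.pyRange 2 max_n 1).filter is_prime)).map
          (fun t => (t.2.2, t.1, t.2.1)) := by
  unfold generate_small_semiprimes
  set P := (PySem.List.pyRange 2 max_n 1).filter is_prime with hP
  rw [PySem.List.foldl_congr_mem _ _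
    (fun acc i => acc ++
      ((PySem.List.pyRange i (P.length : Int) 1).filter
          (fun j => decide (PySem.List.pyGetD P i 0 * PySem.List.pyGetD P j 0 < max_n))).map
        (fun j => (PySem.List.pyGetD P i 0 * PySem.List.pyGetD P j 0,
          PySem.List.pyGetD P i 0, PySem.List.pyGetD P j 0))) []
    (fun acc i _ => PySem.List.foldl_append_ite _ _ _ _),
    PySem.List.foldl_append_eq_flatMap, List.nil_append]
  rw [PySem.List.pyRange_zero_natCast P.length, List.flatMap_map]
  rw [← flatMap_range_drop max_n P]
  apply List.flatMap_congr
  intro k hk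
  rw [List.mem_range] at hk
  rw [← map_pyGetD_drop P k, List.filter_map, List.map_map]
  simp only [PySem.List.pyGetD_natCast]
  rfl

theorem T_eq_filter_map (max_n : Int) :
    (PySem.List.pyRange 4 max_n 1).foldl (fun acc n =>
        let p := smallest_factor n
        if p < n then
          let q := PySem.Int.floordiv n p
          if smallest_factor q == q then acc ++ [(p, q, n)] else acc
        else acc) ([] : List (Int × Int × Int))
      = ((PySem.List.pyRange 4 max_n 1).filter sfCondB).map sfTriple := by
  rw [PySem.List.foldl_congr_mem' (PySem.List.pyRange 4 max_n 1) _
      (fun acc n => if sfCondB n then acc ++ [sfTriple n] else acc) []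
      ?_]
  · rw [PySem.List.foldl_append_if sfCondB sfTriple, List.nil_append]
  · intro n _ acc
    show (if smallest_factor n < n then
            if smallest_factor (PySem.Int.floordiv n (smallest_factor n))
                == PySem.Int.floordiv n (smallest_factor n)
            then acc ++ [(smallest_factor n, PySem.Int.floordiv n (smallest_factor n), n)]
            else acc
          else acc)
        = if sfCondB n then acc ++ [sfTriple n] else acc
    by_cases h1 : smallest_factor n < n
    · by_cases h2 : smallest_factor (PySem.Int.floordiv n (smallest_factor n))
          = PySem.Int.floordiv n (smallest_factor n)
      · rw [if_pos h1, if_pos (beq_iff_eq.mpr h2),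
          if_pos ((sfCondB_iff n).mpr ⟨h1, h2⟩)]
        rfl
      · rw [if_pos h1, if_neg (fun hb => h2 (beq_iff_eq.mp hb)),
          if_neg (fun hc => h2 ((sfCondB_iff n).mp hc).2)]
    · rw [if_neg h1, if_neg (fun hc => h1 ((sfCondB_iff n).mp hc).1)]

theorem mem_P (max_n x : Int) :
    x ∈ (PySem.List.pyRange 2 max_n 1).filter is_prime
      ↔ 2 ≤ x ∧ x < max_n ∧ Nat.Prime x.toNat := by
  rw [List.mem_filter, PySem.List.mem_pyRange_one, is_prime_iff]
  tauto

theorem pairwise_P (max_n : Int) :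
    ((PySem.List.pyRange 2 max_n 1).filter is_prime).Pairwise (· < ·) :=
  List.Pairwise.filter _ (PySem.List.pairwise_lt_pyRange_one 2 max_n)

theorem mem_T_iff_mem_blocks (max_n : Int) (t : Int × Int × Int) :
    t ∈ ((PySem.List.pyRange 4 max_n 1).filter sfCondB).map sfTriple
      ↔ t ∈ blocksB max_n ((PySem.List.pyRange 2 max_n 1).filter is_prime) := by
  rw [List.mem_map, mem_blocksB _ _ (pairwise_P max_n)]
  constructor
  · rintro ⟨n, hn, rfl⟩
    rw [List.mem_filter, PySem.List.mem_pyRange_one] at hn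
    obtain ⟨⟨hn4, hnlt⟩, hc⟩ := hn
    obtain ⟨P, Q, hP, hQ, hPQ, hnPQ, htr⟩ := sfCond_dest n (by omega) hc
    have hp2 : 2 ≤ (P : Int) := by exact_mod_cast hP.two_le
    have hq2 : 2 ≤ (Q : Int) := by exact_mod_cast hQ.two_le
    have hqlt : (P : Int) * 2 ≤ (P : Int) * Q := by nlinarith
    have hplt : 2 * (Q : Int) ≤ (P : Int) * Q := by nlinarith
    refine ⟨(P : Int), (Q : Int), ?_, ?_, by exact_mod_cast hPQ, by omega, ?_⟩
    · rw [mem_P]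
      exact ⟨hp2, by omega, by simpa using hP⟩
    · rw [mem_P]
      exact ⟨hq2, by omega, by simpa using hQ⟩
    · rw [htr, hnPQ]
  · rintro ⟨p, q, hp, hq, hpq, hlt, rfl⟩
    rw [mem_P] at hp hq
    obtain ⟨P, rfl⟩ : ∃ P : Nat, p = (P : Int) := ⟨p.toNat, by omega⟩
    obtain ⟨Q, rfl⟩ : ∃ Q : Nat, q = (Q : Int) := ⟨q.toNat, by omega⟩
    have hsp := sf_of_semiprime P Q (by simpa using hp.2.2) (by simpa using hq.2.2)
      (by exact_mod_cast hpq)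
    refine ⟨(P : Int) * Q, ?_, ?_⟩
    · rw [List.mem_filter, PySem.List.mem_pyRange_one]
      have h1 := hp.1
      have h2 := hq.1
      exact ⟨⟨by nlinarith, hlt⟩, hsp.2.2⟩
    · simp [sfTriple, hsp.1, hsp.2.1]

theorem nodup_T (max_n : Int) :
    (((PySem.List.pyRange 4 max_n 1).filter sfCondB).map sfTriple).Nodup := by
  apply List.Nodup.map
  · intro a b hab
    simpa [sfTriple] using congrArg (fun t => t.2.2) hab
  · apply List.Nodup.filter
    exact (PySem.List.pairwise_lt_pyRange_one 4 max_n).imp (fun h => ne_of_lt h)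

theorem nodup_blocksB (max_n : Int) (P : List Int) (hs : P.Pairwise (· < ·)) :
    (blocksB max_n P).Nodup :=
  (pairwise_blocksB max_n P hs).imp (fun h heq => by
    subst heq; unfold Lt3 at h; omega)

theorem B_eq_blocks (max_n : Int) :
    generate_small_semiprimes_alt max_n
      = (blocksB max_n ((PySem.List.pyRange 2 max_n 1).filter is_prime)).map
          (fun t => (t.2.2, t.1, t.2.1)) := by
  show (PySem.List.sorted2 ((PySem.List.pyRange 4 max_n 1).foldl (fun acc n =>
      let p := smallest_factor n
      if p < n then
        let q := PySem.Int.floordiv n p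
        if smallest_factor q == q then acc ++ [(p, q, n)] else acc
      else acc) ([] : List (Int × Int × Int))) (fun t => t.1) (fun t => t.2.1) false).map
        (fun t => (t.2.2, t.1, t.2.1)) = _
  rw [T_eq_filter_map]
  rw [sorted2_eq_of_perm_of_pairwise _
    (blocksB max_n ((PySem.List.pyRange 2 max_n 1).filter is_prime))
    ((List.perm_ext_iff_of_nodup
        (nodup_blocksB max_n _ (pairwise_P max_n)) (nodup_T max_n)).mpr
      (fun a => (mem_T_iff_mem_blocks max_n a).symm))
    (pairwise_blocksB max_n _ (pairwise_P max_n))]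

-- ===== VERDICT (by name: the statement is the Claim_ definition above) =====
theorem generate_small_semiprimes_spec : Claim_equal_generate_small_semiprimes := by
  intro max_n _
  unfold Spec_generate_small_semiprimes
  rw [A_eq_blocks, B_eq_blocks]
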